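-- pv_equiv track=rewrite | github.com/HaymayndzUltra/haymayndz | validators-system/scripts/validate_all_protocols.py | _resolve_status
-- ===== SOURCE A (Python) =====
-- from typing import Any, Dict, List
--
-- def _resolve_status(statuses: List[str]) -> str:
--     if not statuses:
--         return "fail"
--     if any(status == "fail" for status in statuses):
--         return "fail"
--     if any(status == "warning" for status in statuses):
--         return "warning"
--     return "pass"
-- ===== SOURCE B (Python) =====
-- _RANK = {"fail": 2, "warning": 1}
-- _NAME = ["pass", "warning", "fail"]
--
-- def _resolve_status(statuses):
--     if not statuses:
--         return "fail"
--     worst = 0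
--     for s in statuses:
--         worst = max(worst, _RANK.get(s, 0))
--     return _NAME[worst]
-- ===== Notes on version B (the rewrite author's own statement) =====
-- stated objective: alternative
-- what changed: Replaces three sequential any() scans with a single pass computing the maximum severity rank via a lookup table, then mapping the rank back to its status string.
import Mathlib
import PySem

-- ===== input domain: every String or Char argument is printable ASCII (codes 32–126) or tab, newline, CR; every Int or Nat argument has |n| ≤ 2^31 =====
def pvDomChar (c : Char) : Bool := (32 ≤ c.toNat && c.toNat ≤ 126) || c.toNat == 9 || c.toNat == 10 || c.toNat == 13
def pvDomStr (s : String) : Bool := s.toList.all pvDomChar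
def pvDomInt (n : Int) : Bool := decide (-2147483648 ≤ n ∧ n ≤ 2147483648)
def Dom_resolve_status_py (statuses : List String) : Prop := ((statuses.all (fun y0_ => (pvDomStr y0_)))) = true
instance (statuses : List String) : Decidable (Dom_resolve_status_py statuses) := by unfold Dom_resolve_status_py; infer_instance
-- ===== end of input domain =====

-- B replaces A's three any() scans by one max-of-ranks pass over a lookup table (alternative decomposition, same return value).

-- ===== PORT A =====
def resolve_status_py (statuses : List String) : String :=
  if statuses = [] then "fail"
  else if statuses.any (fun status => status == "fail") then "fail"
  else if statuses.any (fun status => status == "warning") then "warning"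
  else "pass"

-- ===== PORT B =====
-- _RANK.get(s, 0)
def pvRank (s : String) : Nat :=
  PySem.Dict.getD (PySem.Dict.ofList [("fail", (2 : Nat)), ("warning", 1)]) s 0

-- the names table _NAME indexed by rank
def pvName (r : Nat) : String :=
  match r with
  | 0 => "pass"
  | 1 => "warning"
  | _ => "fail"

def resolve_status_py_alt (statuses : List String) : String :=
  if statuses = [] then "fail"
  else pvName (statuses.foldl (fun worst s => max worst (pvRank s)) 0)

-- ===== PRECONDITION & SPEC =====
def Spec_resolve_status_py (statuses : List String) (out : String) : Prop := out = resolve_status_py_alt statuses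
instance (statuses : List String) (out : String) : Decidable (Spec_resolve_status_py statuses out) := by unfold Spec_resolve_status_py; infer_instance

-- ===== CLAIM (what is proved, stated in full; the proofs are below) =====
def Claim_equal_resolve_status_py : Prop := ∀ (statuses : List String), Dom_resolve_status_py statuses → Spec_resolve_status_py statuses (resolve_status_py statuses)

-- ===== LEMMAS AND PROOFS =====

theorem pvRank_dict_eval :
    PySem.Dict.ofList [("fail", (2 : Nat)), ("warning", 1)]
      = PySem.Dict.mk [("fail", 2), ("warning", 1)] := by rfl

theorem pvRank_cases (s : String) :
    pvRank s = if s = "fail" then 2 else if s = "warning" then 1 else 0 := by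
  unfold pvRank
  rw [pvRank_dict_eval]
  simp only [PySem.Dict.getD, PySem.Dict.get?_mk_cons]
  by_cases h1 : s = "fail"
  · simp [h1]
  · by_cases h2 : s = "warning"
    · simp [h2, Ne.symm h1]
    · simp [h1, h2, Ne.symm h1, Ne.symm h2, PySem.Dict.get?]

theorem pvRank_le_two (s : String) : pvRank s ≤ 2 := by
  rw [pvRank_cases]; split_ifs <;> omega

theorem pvRank_eq_two (s : String) : pvRank s = 2 ↔ s = "fail" := by
  rw [pvRank_cases]; split_ifs <;> simp_all

theorem pvRank_eq_one (s : String) : pvRank s = 1 ↔ s = "warning" := by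
  rw [pvRank_cases]; split_ifs <;> simp_all

-- the left fold equals acc ⊔ the right fold (so the seed can be factored out)
theorem foldl_max_rank (statuses : List String) (acc : Nat) :
    statuses.foldl (fun worst s => max worst (pvRank s)) acc
      = max acc (statuses.foldr (fun s m => max (pvRank s) m) 0) := by
  induction statuses generalizing acc with
  | nil => simp
  | cons h t ih => simp only [List.foldl, List.foldr, ih]; omega

theorem foldr_le_two (l : List String) :
    l.foldr (fun s m => max (pvRank s) m) 0 ≤ 2 := by
  induction l with
  | nil => simp
  | cons h t ih => simp only [List.foldr]; have := pvRank_le_two h; omega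

theorem foldr_max_eq_two (l : List String) :
    l.foldr (fun s m => max (pvRank s) m) 0 = 2 ↔ l.any (fun s => s == "fail") := by
  induction l with
  | nil => simp
  | cons h t ih =>
    simp only [List.foldr, List.any_cons, Bool.or_eq_true, beq_iff_eq, ← ih]
    have := pvRank_le_two h
    have h2 := pvRank_eq_two h
    have hb := foldr_le_two t
    constructor
    · intro hm
      have : pvRank h = 2 ∨ t.foldr (fun s m => max (pvRank s) m) 0 = 2 := by omega
      rcases this with h1 | h1
      · exact Or.inl (h2.mp h1)
      · exact Or.inr h1
    · rintro (h1 | h1)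
      · have := h2.mpr h1; omega
      · omega

theorem foldr_max_eq_one (l : List String) :
    l.foldr (fun s m => max (pvRank s) m) 0 = 1 ↔
      (¬ l.any (fun s => s == "fail") ∧ l.any (fun s => s == "warning")) := by
  induction l with
  | nil => simp
  | cons h t ih =>
    simp only [List.foldr, List.any_cons, Bool.or_eq_true, beq_iff_eq] at *
    have hle := pvRank_le_two h
    have h2 := pvRank_eq_two h
    have h1 := pvRank_eq_one h
    have hb := foldr_le_two t
    have hb2 := foldr_max_eq_two t
    simp only [List.any_eq_true, beq_iff_eq] at hb2 ⊢ ih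
    constructor
    · intro hm
      have hne2 : pvRank h ≠ 2 := by omega
      have htne2 : t.foldr (fun s m => max (pvRank s) m) 0 ≠ 2 := by omega
      have hnf : ¬ (h = "fail" ∨ ∃ x ∈ t, x = "fail") := by
        rintro (hf | hf)
        · exact hne2 (h2.mpr hf)
        · exact htne2 (hb2.mpr hf)
      refine ⟨hnf, ?_⟩
      have : pvRank h = 1 ∨ t.foldr (fun s m => max (pvRank s) m) 0 = 1 := by omega
      rcases this with ha | ha
      · exact Or.inl (h1.mp ha)
      · exact Or.inr ((ih.mp ha).2)
    · rintro ⟨hnf, hw⟩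
      push_neg at hnf
      obtain ⟨hnf1, hnf2⟩ := hnf
      have hrne2 : pvRank h ≠ 2 := fun hc => hnf1 (h2.mp hc)
      have htne2 : t.foldr (fun s m => max (pvRank s) m) 0 ≠ 2 := fun hc => by
        obtain ⟨x, hx, hx2⟩ := hb2.mp hc
        exact hnf2 x hx hx2
      rcases hw with hw | hw
      · have := h1.mpr hw; omega
      · have : t.foldr (fun s m => max (pvRank s) m) 0 = 1 :=
          ih.mpr ⟨fun ⟨x, hx, hx2⟩ => hnf2 x hx hx2, hw⟩
        omega

-- ===== VERDICT (by name: the statement is the Claim_ definition above) =====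
theorem resolve_status_py_spec : Claim_equal_resolve_status_py := by
  intro statuses _
  unfold Spec_resolve_status_py resolve_status_py resolve_status_py_alt
  by_cases hnil : statuses = []
  · simp [hnil]
  · simp only [hnil, if_false]
    rw [foldl_max_rank, Nat.zero_max]
    set m := statuses.foldr (fun s mm => max (pvRank s) mm) 0 with hm
    have hle := foldr_le_two statuses
    have h2 := foldr_max_eq_two statuses
    have h1 := foldr_max_eq_one statuses
    by_cases hf : statuses.any (fun s => s == "fail") = true
    · simp only [hf, if_true]
      have : m = 2 := h2.mpr hf
      simp [this, pvName]
    · simp only [hf, if_false]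
      by_cases hw : statuses.any (fun s => s == "warning") = true
      · simp only [hw, if_true]
        have : m = 1 := h1.mpr ⟨by simp [hf], hw⟩
        simp [this, pvName]
      · have hne2 : m ≠ 2 := fun hc => hf (h2.mp hc)
        have hne1 : m ≠ 1 := fun hc => hw (h1.mp hc).2
        have : m = 0 := by omega
        simp [hw, this, pvName]
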